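-- pv_equiv track=rewrite | github.com/FerrisMind/Oxide-Lab | scripts/analyze_large_files.py | categorize_files_by_size
-- ===== SOURCE A (Python) =====
-- from typing import List, Tuple, Dict
--
-- def categorize_files_by_size(files: List[Tuple[str, int]]) -> Dict[str, List[Tuple[str, int]]]:
--     """Categorize files by size ranges for refactoring priority."""
--     categories = {
--         'Critical (500+ lines)': [],
--         'High Priority (300-499 lines)': [],
--         'Medium Priority (200-299 lines)': []
--     }
--
--     for file_path, line_count in files:
--         if line_count >= 500:
--             categories['Critical (500+ lines)'].append((file_path, line_count))
--         elif line_count >= 300: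
--             categories['High Priority (300-499 lines)'].append((file_path, line_count))
--         else:
--             categories['Medium Priority (200-299 lines)'].append((file_path, line_count))
--
--     return categories
-- ===== SOURCE B (Python) =====
-- from typing import List, Tuple, Dict
--
-- def categorize_files_by_size(files: List[Tuple[str, int]]) -> Dict[str, List[Tuple[str, int]]]:
--     """Categorize files by size ranges for refactoring priority."""
--     return {
--         'Critical (500+ lines)': [(p, n) for (p, n) in files if n >= 500],
--         'High Priority (300-499 lines)': [(p, n) for (p, n) in files if 300 <= n < 500],
--         'Medium Priority (200-299 lines)': [(p, n) for (p, n) in files if n < 300],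
--     }
-- ===== Notes on version B (the rewrite author's own statement) =====
-- stated objective: idiomatic
-- what changed: Replaces the single branchy accumulation pass with a dict literal of three independent filtering comprehensions, one per bucket, each with a complete interval predicate.
import Mathlib
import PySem

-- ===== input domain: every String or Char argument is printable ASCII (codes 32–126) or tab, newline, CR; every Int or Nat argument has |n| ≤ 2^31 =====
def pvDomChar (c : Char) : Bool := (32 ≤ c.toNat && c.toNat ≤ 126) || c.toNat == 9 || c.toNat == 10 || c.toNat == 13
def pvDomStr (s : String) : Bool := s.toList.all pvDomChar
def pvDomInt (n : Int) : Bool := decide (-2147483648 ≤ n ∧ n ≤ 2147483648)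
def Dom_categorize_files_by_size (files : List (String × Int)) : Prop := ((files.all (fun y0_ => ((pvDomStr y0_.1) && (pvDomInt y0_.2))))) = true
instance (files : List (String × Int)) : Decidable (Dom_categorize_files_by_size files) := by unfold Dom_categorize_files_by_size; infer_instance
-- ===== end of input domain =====

-- B builds the dict as three independent filtering comprehensions with complete interval
-- predicates instead of A's single pass with chained if/elif/else (objective: idiomatic).

-- ===== PORT A =====
-- A's dict has three fixed keys; its mutable state is the three bucket lists, threaded
-- through one left fold over `files` with chained branches appending to the matching bucket.
def categorize_files_by_size (files : List (String × Int)) : List (String × List (String × Int)) :=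
  let st := files.foldl (fun (st : List (String × Int) × List (String × Int) × List (String × Int)) fp =>
      let (c, h, m) := st
      if fp.2 ≥ 500 then (c ++ [fp], h, m)
      else if fp.2 ≥ 300 then (c, h ++ [fp], m)
      else (c, h, m ++ [fp]))
    ([], [], [])
  [("Critical (500+ lines)", st.1),
   ("High Priority (300-499 lines)", st.2.1),
   ("Medium Priority (200-299 lines)", st.2.2)]

-- ===== PORT B =====
def categorize_files_by_size_alt (files : List (String × Int)) : List (String × List (String × Int)) :=
  [("Critical (500+ lines)", files.filter (fun fp => fp.2 ≥ 500)),
   ("High Priority (300-499 lines)", files.filter (fun fp => 300 ≤ fp.2 ∧ fp.2 < 500)),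
   ("Medium Priority (200-299 lines)", files.filter (fun fp => fp.2 < 300))]

-- ===== PRECONDITION & SPEC =====
def Spec_categorize_files_by_size (files : List (String × Int)) (out : List (String × List (String × Int))) : Prop := out = categorize_files_by_size_alt files
instance (files : List (String × Int)) (out : List (String × List (String × Int))) : Decidable (Spec_categorize_files_by_size files out) := by unfold Spec_categorize_files_by_size; infer_instance

-- ===== CLAIM (what is proved, stated in full; the proofs are below) =====
def Claim_equal_categorize_files_by_size : Prop := ∀ (files : List (String × Int)), Dom_categorize_files_by_size files → Spec_categorize_files_by_size files (categorize_files_by_size files)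

-- ===== LEMMAS AND PROOFS =====
-- Loop invariant: the fold appends to each accumulator exactly the elements passing
-- the corresponding (disjoint, complete) interval predicate, in order.
theorem categorize_fold_inv (files : List (String × Int))
    (c h m : List (String × Int)) :
    files.foldl (fun (st : List (String × Int) × List (String × Int) × List (String × Int)) fp =>
      let (c, h, m) := st
      if fp.2 ≥ 500 then (c ++ [fp], h, m)
      else if fp.2 ≥ 300 then (c, h ++ [fp], m)
      else (c, h, m ++ [fp])) (c, h, m)
    = (c ++ files.filter (fun fp => fp.2 ≥ 500),
       h ++ files.filter (fun fp => 300 ≤ fp.2 ∧ fp.2 < 500),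
       m ++ files.filter (fun fp => fp.2 < 300)) := by
  induction files generalizing c h m with
  | nil => simp
  | cons x xs ih =>
    by_cases h5 : x.2 ≥ 500
    · simp [List.foldl_cons, h5, ih, List.filter_cons]
      omega
    · by_cases h3 : x.2 ≥ 300
      · simp [List.foldl_cons, h5, h3, ih, List.filter_cons]
      · simp [List.foldl_cons, h5, h3, ih, List.filter_cons]

-- ===== VERDICT (by name: the statement is the Claim_ definition above) =====
theorem categorize_files_by_size_spec : Claim_equal_categorize_files_by_size := by
  intro files _
  unfold Spec_categorize_files_by_size categorize_files_by_size categorize_files_by_size_alt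
  simp [categorize_fold_inv]
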